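-- pv_equiv track=rewrite | github.com/EthanHunt711/Turtle | week5.py | anti_allit
-- ===== SOURCE A (Python) =====
-- def anti_allit(words):
--     if len(words) <= 1:
--         return True
--     else:
--         first_letter_list = []
--         for w in words:
--             w = w.lower()
--             first_letter_list.append(w[0])
--         for char in first_letter_list:
--             if first_letter_list.count(char) > 1:
--                 return False
--         return True
-- ===== SOURCE B (Python) =====
-- def anti_allit(words):
--     if len(words) <= 1:
--         return True
--     firsts = sorted(w.lower()[0] for w in words)
--     for a, b in zip(firsts, firsts[1:]):
--         if a == b:
--             return False
--     return True
-- ===== Notes on version B (the rewrite author's own statement) =====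
-- stated objective: alternative
-- what changed: Replaces A's per-element count scan over the whole first-letter list with sort-then-adjacent-compare on the lowercased first letters.
import Mathlib
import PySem

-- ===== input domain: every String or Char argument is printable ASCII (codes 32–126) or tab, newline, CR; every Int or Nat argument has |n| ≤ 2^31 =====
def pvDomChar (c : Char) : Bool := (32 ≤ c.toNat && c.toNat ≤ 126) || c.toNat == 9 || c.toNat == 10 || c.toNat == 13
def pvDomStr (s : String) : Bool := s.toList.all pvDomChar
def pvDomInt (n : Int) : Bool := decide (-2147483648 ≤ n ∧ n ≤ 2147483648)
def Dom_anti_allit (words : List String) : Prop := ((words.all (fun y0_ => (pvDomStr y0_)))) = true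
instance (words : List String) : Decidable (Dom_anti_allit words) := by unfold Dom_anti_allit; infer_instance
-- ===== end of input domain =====

-- B decides uniqueness of lowercased first letters by sort + adjacent compare instead of A's count scan (same return value).
-- ===== PORT A =====
def pvHead (w : String) : Char :=
  match (PySem.Str.lower w).toList with
  | [] => ' '      -- unreachable under Pre_: Python raises IndexError on an empty word
  | c :: _ => c

def pvFirstsA (words : List String) : List Char :=
  words.foldl (fun acc w => acc ++ [pvHead w]) []

def pvCheckA (full : List Char) : List Char → Bool
  | [] => true
  | c :: rest => if full.count c > 1 then false else pvCheckA full rest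

def anti_allit (words : List String) : Bool :=
  if words.length ≤ 1 then true
  else
    let firsts := pvFirstsA words
    pvCheckA firsts firsts

-- ===== PORT B =====
def pvAdjDistinct : List Char → Bool
  | a :: b :: t => if a == b then false else pvAdjDistinct (b :: t)
  | _ => true

def anti_allit_alt (words : List String) : Bool :=
  if words.length ≤ 1 then true
  else
    let firsts := PySem.List.sorted (words.map pvHead) (fun x => x) false
    pvAdjDistinct firsts

-- ===== PRECONDITION & SPEC =====
-- Pre_ excludes the inputs on which Python A raises IndexError: an empty word in a list of length ≥ 2.
def Pre_anti_allit (words : List String) : Prop :=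
  words.length ≤ 1 ∨ ∀ w ∈ words, w ≠ ""
instance (words : List String) : Decidable (Pre_anti_allit words) := by
  unfold Pre_anti_allit; infer_instance
def pvWitness_anti_allit : List String := ["Apple", "banana", "Cherry"]

def Spec_anti_allit (words : List String) (out : Bool) : Prop := out = anti_allit_alt words
instance (words : List String) (out : Bool) : Decidable (Spec_anti_allit words out) := by unfold Spec_anti_allit; infer_instance

-- ===== CLAIM (what is proved, stated in full; the proofs are below) =====
def Claim_equal_anti_allit : Prop := ∀ (words : List String), Dom_anti_allit words → Pre_anti_allit words → Spec_anti_allit words (anti_allit words)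

-- ===== LEMMAS AND PROOFS =====
theorem pvFirstsA_eq_map (words : List String) : pvFirstsA words = words.map pvHead := by
  simpa [pvFirstsA] using PySem.List.foldl_append_singleton_eq_map (l := words) (f := pvHead) (acc := [])

theorem pvCheckA_eq_true (full : List Char) (l : List Char) :
    pvCheckA full l = true ↔ ∀ c ∈ l, full.count c ≤ 1 := by
  induction l with
  | nil => simp [pvCheckA]
  | cons c rest ih =>
    by_cases h : full.count c > 1 <;> simp [pvCheckA, h, ih] <;> omega

theorem pvCheckA_nodup (full : List Char) : pvCheckA full full = true ↔ full.Nodup := by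
  rw [pvCheckA_eq_true, List.nodup_iff_count_le_one]
  constructor
  · intro h c
    by_cases hc : c ∈ full
    · exact h c hc
    · simp [List.count_eq_zero_of_not_mem hc]
  · intro h c _; exact h c

theorem pvAdjDistinct_chain (l : List Char) : pvAdjDistinct l = true ↔ l.IsChain (· ≠ ·) := by
  induction l with
  | nil => simp [pvAdjDistinct]
  | cons a t ih =>
    cases t with
    | nil => simp [pvAdjDistinct]
    | cons b t' =>
      by_cases h : a = b <;>
        simp [pvAdjDistinct, h, List.isChain_cons_cons, ih]

theorem isChain_lt_of_le_ne (l : List Char) :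
    l.IsChain (· ≤ ·) → l.IsChain (· ≠ ·) → l.IsChain (· < ·) := by
  induction l with
  | nil => intro _ _; exact .nil
  | cons a t ih =>
    cases t with
    | nil => intro _ _; exact .singleton _
    | cons b t' =>
      intro h1 h2
      rw [List.isChain_cons_cons] at h1 h2 ⊢
      exact ⟨lt_of_le_of_ne h1.1 h2.1, ih h1.2 h2.2⟩

theorem pvAdjDistinct_sorted_nodup (l : List Char) (hs : l.Pairwise (· ≤ ·)) :
    pvAdjDistinct l = true ↔ l.Nodup := by
  rw [pvAdjDistinct_chain]
  constructor
  · intro h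
    have hlt : l.Pairwise (· < ·) :=
      List.isChain_iff_pairwise.mp (isChain_lt_of_le_ne l hs.isChain h)
    exact hlt.imp ne_of_lt
  · intro h
    exact List.Pairwise.isChain h

-- ===== VERDICT (by name: the statement is the Claim_ definition above) =====
theorem anti_allit_spec : Claim_equal_anti_allit := by
  intro words _ hpre
  unfold Spec_anti_allit anti_allit anti_allit_alt
  by_cases hlen : words.length ≤ 1
  · simp [hlen]
  · simp only [hlen, if_false]
    rw [pvFirstsA_eq_map]
    set f := words.map pvHead with hf
    set s := PySem.List.sorted f (fun x => x) false with hsdef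
    have hperm : s.Perm f := PySem.List.sorted_perm f (fun x => x) false
    have hpw : s.Pairwise (· ≤ ·) := by
      simpa using PySem.List.sorted_pairwise f (fun x => x)
    have h1 : pvCheckA f f = true ↔ f.Nodup := pvCheckA_nodup f
    have h2 : pvAdjDistinct s = true ↔ s.Nodup := pvAdjDistinct_sorted_nodup s hpw
    have h3 : s.Nodup ↔ f.Nodup := hperm.nodup_iff
    cases hA : pvCheckA f f <;> cases hB : pvAdjDistinct s
    · rfl
    · exact absurd ((h1.mpr (h3.mp (h2.mp hB)))) (by simp [hA])
    · exact absurd (h2.mpr (h3.mpr (h1.mp hA))) (by simp [hB])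
    · rfl
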